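-- pv_equiv track=rewrite | github.com/SuperLeis/UP_code | cash_classify_data_kitchen.py | classfy_card_1
-- ===== SOURCE A (Python) =====
-- def classfy_card_1(arr):
--
--     novel_list = ['042','942','041']
--     flag_novel = 0
--     for element in arr:
--         if element in novel_list:
--             flag_novel = flag_novel + 1
--     if (flag_novel>5):
--         return '1_1'
--     else:
--         return '1'
-- ===== SOURCE B (Python) =====
-- def classfy_card_1(arr):
--     flag = sum(arr.count(t) for t in ('042', '942', '041'))
--     return '1_1' if flag > 5 else '1'
-- ===== Notes on version B (the rewrite author's own statement) =====
-- stated objective: idiomatic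
-- what changed: Replaces A's single pass over arr with a running accumulator and a membership test per element by three staged list.count passes, one per target string, summed; correct because the matches of the three distinct targets partition A's matches.
import Mathlib
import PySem

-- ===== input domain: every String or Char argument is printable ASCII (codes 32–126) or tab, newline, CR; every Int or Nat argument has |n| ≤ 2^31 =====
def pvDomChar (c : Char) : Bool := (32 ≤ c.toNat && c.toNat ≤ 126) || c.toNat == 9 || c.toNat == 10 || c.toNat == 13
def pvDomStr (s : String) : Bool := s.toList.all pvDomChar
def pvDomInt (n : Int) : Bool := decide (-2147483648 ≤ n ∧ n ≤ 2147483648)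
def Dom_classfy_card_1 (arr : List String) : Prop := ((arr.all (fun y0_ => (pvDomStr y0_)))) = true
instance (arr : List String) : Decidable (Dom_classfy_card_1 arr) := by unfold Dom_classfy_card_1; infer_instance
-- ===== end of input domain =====

-- B replaces A's single accumulator pass with a membership test by three staged list.count passes, summed (idiomatic).

-- ===== PORT A =====
def classfy_card_1 (arr : List String) : String :=
  let novel_list : List String := ["042", "942", "041"]
  let flag_novel : Int :=
    arr.foldl (fun flag element => if element ∈ novel_list then flag + 1 else flag) 0
  if flag_novel > 5 then "1_1" else "1"

-- ===== PORT B =====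
def classfy_card_1_alt (arr : List String) : String :=
  let flag : Nat :=
    ((["042", "942", "041"] : List String).map (fun t => PySem.List.count arr t)).sum
  if flag > 5 then "1_1" else "1"

-- ===== PRECONDITION & SPEC =====
def Spec_classfy_card_1 (arr : List String) (out : String) : Prop := out = classfy_card_1_alt arr
instance (arr : List String) (out : String) : Decidable (Spec_classfy_card_1 arr out) := by unfold Spec_classfy_card_1; infer_instance

-- ===== CLAIM (what is proved, stated in full; the proofs are below) =====
def Claim_equal_classfy_card_1 : Prop := ∀ (arr : List String), Dom_classfy_card_1 arr → Spec_classfy_card_1 arr (classfy_card_1 arr)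

-- ===== LEMMAS AND PROOFS =====

-- A's running accumulator equals the sum of the three per-target counts.
theorem classfy_flag_eq (arr : List String) (acc : Int) :
    arr.foldl (fun flag element =>
        if element ∈ (["042", "942", "041"] : List String) then flag + 1 else flag) acc
      = acc + arr.count "042" + arr.count "942" + arr.count "041" := by
  induction arr generalizing acc with
  | nil => simp
  | cons x xs ih =>
    simp only [List.foldl_cons, List.count_cons, ih]
    by_cases h : x ∈ (["042", "942", "041"] : List String)
    · simp only [if_pos h]
      simp only [List.mem_cons, List.not_mem_nil, or_false] at h
      rcases h with rfl | rfl | rfl <;> simp <;> ring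
    · simp only [if_neg h]
      have h1 : x ≠ "042" := by rintro rfl; simp at h
      have h2 : x ≠ "942" := by rintro rfl; simp at h
      have h3 : x ≠ "041" := by rintro rfl; simp at h
      simp [h1, h2, h3]

-- ===== VERDICT (by name: the statement is the Claim_ definition above) =====
theorem classfy_card_1_spec : Claim_equal_classfy_card_1 := by
  intro arr _
  unfold Spec_classfy_card_1 classfy_card_1 classfy_card_1_alt
  simp only [classfy_flag_eq, zero_add, PySem.List.count_eq, List.map_cons, List.map_nil,
    List.sum_cons, List.sum_nil, add_zero]
  by_cases h : 5 < arr.count "042" + arr.count "942" + arr.count "041"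
  · rw [if_pos (by omega), if_pos (by omega)]
  · rw [if_neg (by omega), if_neg (by omega)]
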